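-- pv_equiv track=rewrite | github.com/SpencerPao/ComputerVision | Dinosaur Game/Window_capture/main.py | remove_faults
-- ===== SOURCE A (Python) =====
-- from typing import List
--
-- def remove_faults(target: List[int]) -> int:
--     """Remove last moments of failure from target."""
--     targ = target
--     to_remove = 0  # value to remove before last -1
--     v = 0  # 2nd value to check to break loop
--     ta = False  # Target acquired.
--     for t in targ[::-1]:
--         if t == -1:
--             to_remove += 1
--         elif t != -1 and not ta:
--             ta = True
--             v = t
--             to_remove += 1
--         elif ta and t == v:
--             to_remove += 1
--         elif ta and t != v:
--             break
--     return to_remove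
-- ===== SOURCE B (Python) =====
-- from typing import List
--
-- def remove_faults(target: List[int]) -> int:
--     """Remove last moments of failure from target."""
--     # v = the last non-(-1) value of the list (None if there is none)
--     v = None
--     for t in target:
--         if t != -1:
--             v = t
--     # boundary = one past the last index whose element is neither -1 nor v
--     boundary = 0
--     for i, t in enumerate(target):
--         if t != -1 and t != v:
--             boundary = i + 1
--     return len(target) - boundary
-- ===== Notes on version B (the rewrite author's own statement) =====
-- stated objective: alternative
-- what changed: Instead of A's single backward scan with a latch flag, B makes two forward passes: it computes v (the last non -1 value) and the position one past the last element that is neither -1 nor v, and returns len(target) minus that boundary as a closed form.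
import Mathlib
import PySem

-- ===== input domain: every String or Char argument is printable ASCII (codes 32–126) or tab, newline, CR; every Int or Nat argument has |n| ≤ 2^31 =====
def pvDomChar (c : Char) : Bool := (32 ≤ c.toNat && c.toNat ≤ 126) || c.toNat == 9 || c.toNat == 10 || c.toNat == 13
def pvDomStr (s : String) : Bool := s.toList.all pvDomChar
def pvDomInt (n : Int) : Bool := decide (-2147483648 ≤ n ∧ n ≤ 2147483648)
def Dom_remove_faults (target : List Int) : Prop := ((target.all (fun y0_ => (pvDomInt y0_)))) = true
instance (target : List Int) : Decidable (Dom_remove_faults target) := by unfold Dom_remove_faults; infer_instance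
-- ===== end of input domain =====

-- B replaces A's backward scan with latch flag by two forward passes and a closed form:
-- it computes v (the last non -1 value) and the position one past the last element that is
-- neither -1 nor v, and returns length minus that boundary (objective: alternative).

-- ===== PORT A =====
-- for t in targ[::-1] with state (to_remove, v, ta); the final 'break' returns to_remove.
def removeFaultsLoopA : List Int → Int → Int → Bool → Int
  | [], to_remove, _, _ => to_remove
  | t :: rest, to_remove, v, ta =>
    if t = -1 then removeFaultsLoopA rest (to_remove + 1) v ta
    else if t ≠ -1 ∧ ta = false then removeFaultsLoopA rest (to_remove + 1) t true
    else if ta = true ∧ t = v then removeFaultsLoopA rest (to_remove + 1) v ta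
    else if ta = true ∧ t ≠ v then to_remove
    else removeFaultsLoopA rest to_remove v ta   -- unreachable (branches are exhaustive)

def remove_faults (target : List Int) : Int :=
  -- targ[::-1] = target.reverse
  removeFaultsLoopA target.reverse 0 0 false

-- ===== PORT B =====
-- first forward pass: v = None; for t in target: if t != -1: v = t
def rfLastV (target : List Int) : Option Int :=
  target.foldl (fun v t => if t ≠ -1 then some t else v) none

-- second forward pass: for i, t in enumerate(target): if t != -1 and t != v: boundary = i + 1
-- (Python 't != v' with v possibly None is 'some t ≠ v' on Option Int)
def rfBoundary (target : List Int) (v : Option Int) : Int :=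
  (PySem.List.enumerate target).foldl
    (fun b p => if p.2 ≠ -1 ∧ some p.2 ≠ v then p.1 + 1 else b) 0

def remove_faults_alt (target : List Int) : Int :=
  (target.length : Int) - rfBoundary target (rfLastV target)

-- ===== PRECONDITION & SPEC =====
def Spec_remove_faults (target : List Int) (out : Int) : Prop := out = remove_faults_alt target
instance (target : List Int) (out : Int) : Decidable (Spec_remove_faults target out) := by unfold Spec_remove_faults; infer_instance

-- ===== CLAIM (what is proved, stated in full; the proofs are below) =====
def Claim_equal_remove_faults : Prop := ∀ (target : List Int), Dom_remove_faults target → Spec_remove_faults target (remove_faults target)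

-- ===== LEMMAS AND PROOFS =====

-- first non-(-1) element of a list (= last non-(-1) element of its reverse)
def rfFirstNon (r : List Int) : Option Int := r.find? (fun t => decide (t ≠ -1))

-- reference recursions describing A's loop over the reversed list
def rfTail (v : Int) : List Int → Int → Int
  | [], c => c
  | t :: rest, c => if t = -1 ∨ t = v then rfTail v rest (c + 1) else c

def rfComb : List Int → Int → Int
  | [], c => c
  | t :: rest, c => if t = -1 then rfComb rest (c + 1) else rfTail t rest (c + 1)

-- A's loop after the target is acquired equals rfTail
theorem loopA_acquired (l : List Int) : ∀ (c v : Int),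
    removeFaultsLoopA l c v true = rfTail v l c := by
  induction l with
  | nil => intro c v; rfl
  | cons t rest ih =>
    intro c v
    by_cases h1 : t = -1
    · simp [removeFaultsLoopA, rfTail, h1, ih]
    · by_cases h2 : t = v
      · simp [removeFaultsLoopA, rfTail, h2, ih]
      · simp [removeFaultsLoopA, rfTail, h1, h2]

-- A's loop from the initial state equals rfComb
theorem loopA_init (l : List Int) : ∀ (c v : Int),
    removeFaultsLoopA l c v false = rfComb l c := by
  induction l with
  | nil => intro c v; rfl
  | cons t rest ih =>
    intro c v
    by_cases h1 : t = -1
    · simp [removeFaultsLoopA, rfComb, h1, ih]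
    · simp [removeFaultsLoopA, rfComb, h1, loopA_acquired]

-- rfTail counts the longest prefix of elements equal to -1 or v
theorem rfTail_takeWhile (v : Int) (l : List Int) : ∀ (c : Int),
    rfTail v l c = c + ((l.takeWhile (fun t => decide (t = -1 ∨ t = v))).length : Int) := by
  induction l with
  | nil => intro c; simp [rfTail]
  | cons t rest ih =>
    intro c
    by_cases h : t = -1 ∨ t = v
    · simp [rfTail, List.takeWhile, h, ih]; ring
    · simp [rfTail, List.takeWhile, h]

-- rfComb counts the longest prefix of elements equal to -1 or the first non-(-1) element
theorem rfComb_takeWhile (l : List Int) : ∀ (c : Int),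
    rfComb l c = c + ((l.takeWhile (fun t => decide (t = -1 ∨ some t = rfFirstNon l))).length : Int) := by
  induction l with
  | nil => intro c; simp [rfComb]
  | cons t rest ih =>
    intro c
    by_cases h : t = -1
    · have hfn : rfFirstNon (t :: rest) = rfFirstNon rest := by
        simp [rfFirstNon, List.find?, h]
      rw [hfn]
      simp [rfComb, List.takeWhile, h, ih]
      ring
    · have hfn : rfFirstNon (t :: rest) = some t := by
        simp [rfFirstNon, List.find?, h]
      rw [hfn]
      have hpred : (fun x => decide (x = -1 ∨ some x = some t)) = (fun x => decide (x = -1 ∨ x = t)) := by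
        funext x; simp
      simp only [rfComb, if_neg h, List.takeWhile]
      rw [hpred, rfTail_takeWhile]
      simp [h]
      ring

-- the forward "keep the last non-(-1) value" fold equals find? on the reverse
theorem lastV_eq_firstNon_rev (l : List Int) : ∀ (init : Option Int),
    l.foldl (fun v t => if t ≠ -1 then some t else v) init
      = (rfFirstNon l.reverse).or init := by
  induction l with
  | nil => intro init; simp [rfFirstNon]
  | cons t rest ih =>
    intro init
    simp only [List.foldl_cons, List.reverse_cons]
    rw [ih]
    unfold rfFirstNon
    rw [List.find?_append]
    cases hfind : rest.reverse.find? (fun t => decide (t ≠ -1)) with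
    | some x => simp [Option.or]
    | none =>
      by_cases h : t = -1
      · simp [List.find?, h]
      · simp [List.find?, h]

-- the boundary fold equals length minus the count of trailing good elements
theorem boundary_eq (v : Option Int) (target : List Int) :
    rfBoundary target v
      = (target.length : Int)
        - ((target.reverse.takeWhile (fun t => decide (t = -1 ∨ some t = v))).length : Int) := by
  induction target using List.reverseRecOn with
  | nil => simp [rfBoundary, PySem.List.enumerate]
  | append_singleton xs x ih =>
    unfold rfBoundary at ih ⊢
    rw [PySem.List.enumerate_append, List.foldl_append]
    by_cases h : x = -1 ∨ some x = v
    · have hb : ¬ (x ≠ -1 ∧ some x ≠ v) := by tauto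
      simp only [PySem.List.enumerate, List.foldl_cons, List.foldl_nil, hb, if_neg,
        not_false_eq_true]
      rw [ih]
      simp [h]
    · have hb : (x ≠ -1 ∧ some x ≠ v) := by tauto
      have htw : ((xs ++ [x]).reverse.takeWhile (fun t => decide (t = -1 ∨ some t = v))) = [] := by
        simp [h]
      rw [htw]
      simp [PySem.List.enumerate, hb]

-- ===== VERDICT (by name: the statement is the Claim_ definition above) =====
theorem remove_faults_spec : Claim_equal_remove_faults := by
  intro target _
  unfold Spec_remove_faults remove_faults remove_faults_alt rfLastV
  rw [loopA_init, rfComb_takeWhile, lastV_eq_firstNon_rev]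
  have : (rfFirstNon target.reverse).or none = rfFirstNon target.reverse := by
    cases rfFirstNon target.reverse <;> rfl
  rw [this, boundary_eq (rfFirstNon target.reverse) target]
  have hlen : target.reverse.length = target.length := List.length_reverse
  ring_nf
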